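-- pv_equiv track=rewrite | github.com/Jailoschi/python-ass | text_analyzer.py | text_analyzer
-- ===== SOURCE A (Python) =====
-- def text_analyzer(text: str):
--     """
--     Counts the number of words, uppercase letters, lowercase letters,
--      and punctuation characters
--
--     Args:
--         text: string of words
--
--     Returns:
--         Tuple of the number of words, uppercase letters, lowercase letters
--         and punctuation marks
--     """
--     word_count = 0
--     upper_count = 0
--     lower_count = 0
--     punc_count = 0
--     p_marks = [".", ",", "?", "!"]
--
--     for word in range(len(text)):
--         if text[word] in p_marks:
--             punc_count += 1
--         elif text[word].isupper():
--             upper_count += 1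
--         elif text[word].islower():
--             lower_count += 1
--
--     return word_count, upper_count, lower_count, punc_count
-- ===== SOURCE B (Python) =====
-- def text_analyzer(text: str):
--     """Frequency-table re-implementation: build a char-count dict once,
--     then sum the counts of each category over the distinct characters.
--     word_count stays fixed at 0, as in the original."""
--     freq = {}
--     for ch in text:
--         freq[ch] = freq.get(ch, 0) + 1
--     punc_count = sum(c for ch, c in freq.items() if ch in ".,?!")
--     upper_count = sum(c for ch, c in freq.items() if ch.isupper())
--     lower_count = sum(c for ch, c in freq.items() if ch.islower())
--     return 0, upper_count, lower_count, punc_count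
-- ===== Notes on version B (the rewrite author's own statement) =====
-- stated objective: idiomatic
-- what changed: B builds a character-frequency dict in one pass and then computes each category (punctuation, upper, lower) by summing the counts of the distinct characters, instead of A's single per-character elif scan; word_count stays fixed at 0 as in A.
import Mathlib
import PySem

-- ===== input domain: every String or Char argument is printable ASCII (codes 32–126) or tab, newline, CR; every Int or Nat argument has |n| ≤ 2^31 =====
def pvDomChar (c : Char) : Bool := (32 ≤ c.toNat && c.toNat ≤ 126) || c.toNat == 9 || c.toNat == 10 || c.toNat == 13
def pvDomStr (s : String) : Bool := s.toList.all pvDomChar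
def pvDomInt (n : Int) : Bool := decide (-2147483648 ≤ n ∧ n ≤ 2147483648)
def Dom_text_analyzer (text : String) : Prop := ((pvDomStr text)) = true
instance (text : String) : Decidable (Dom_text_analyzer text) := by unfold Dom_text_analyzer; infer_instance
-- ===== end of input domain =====

-- B replaces A's single per-character elif scan by a character-frequency table
-- built once, with each category summed over the distinct characters (idiomatic).

-- ===== PORT A =====
def pvMarks : List Char := ['.', ',', '?', '!']

def text_analyzer (text : String) : Int × Int × Int × Int :=
  -- word_count = 0; upper_count = 0; lower_count = 0; punc_count = 0
  -- for word in range(len(text)): elif-chain on text[word]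
  text.toList.foldl (fun (st : Int × Int × Int × Int) c =>
    let (w, u, l, p) := st
    if c ∈ pvMarks then (w, u, l, p + 1)
    else if PySem.Chars.isupper c then (w, u + 1, l, p)
    else if PySem.Chars.islower c then (w, u, l + 1, p)
    else st) (0, 0, 0, 0)

-- ===== PORT B =====
def text_analyzer_alt (text : String) : Int × Int × Int × Int :=
  -- freq = {}; for ch in text: freq[ch] = freq.get(ch, 0) + 1
  let freq := text.toList.foldl (fun d ch => d.insert ch (d.getD ch 0 + 1)) PySem.Dict.empty
  -- sum(c for ch, c in freq.items() if <category test>)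
  let punc := ((freq.items.filter (fun kv => kv.1 ∈ pvMarks)).map (·.2)).sum
  let upper := ((freq.items.filter (fun kv => PySem.Chars.isupper kv.1)).map (·.2)).sum
  let lower := ((freq.items.filter (fun kv => PySem.Chars.islower kv.1)).map (·.2)).sum
  (0, upper, lower, punc)

-- ===== PRECONDITION & SPEC =====
def Spec_text_analyzer (text : String) (out : Int × Int × Int × Int) : Prop := out = text_analyzer_alt text
instance (text : String) (out : Int × Int × Int × Int) : Decidable (Spec_text_analyzer text out) := by unfold Spec_text_analyzer; infer_instance

-- ===== CLAIM (what is proved, stated in full; the proofs are below) =====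
def Claim_equal_text_analyzer : Prop := ∀ (text : String), Dom_text_analyzer text → Spec_text_analyzer text (text_analyzer text)

-- ===== LEMMAS AND PROOFS =====

-- a punctuation mark is neither upper nor lower case
theorem pv_mark_not_upper {c : Char} (h : c ∈ pvMarks) : PySem.Chars.isupper c = false := by
  fin_cases h <;> decide

theorem pv_mark_not_lower {c : Char} (h : c ∈ pvMarks) : PySem.Chars.islower c = false := by
  fin_cases h <;> decide

theorem pv_upper_not_lower {c : Char} (h : PySem.Chars.isupper c = true) :
    PySem.Chars.islower c = false := by
  simp only [PySem.Chars.isupper, Bool.and_eq_true, decide_eq_true_eq] at h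
  have hle : ¬ ('a' ≤ c) := fun hc => absurd (le_trans hc h.2) (by decide)
  simp [PySem.Chars.islower, hle]

-- A's loop counts each of the three (disjoint) categories with countP
theorem pv_A_loop (cs : List Char) (w u l p : Int) :
    cs.foldl (fun (st : Int × Int × Int × Int) c =>
      let (w, u, l, p) := st
      if c ∈ pvMarks then (w, u, l, p + 1)
      else if PySem.Chars.isupper c then (w, u + 1, l, p)
      else if PySem.Chars.islower c then (w, u, l + 1, p)
      else st) (w, u, l, p) =
    (w, u + (cs.countP PySem.Chars.isupper : Int),
        l + (cs.countP PySem.Chars.islower : Int),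
        p + (cs.countP (· ∈ pvMarks) : Int)) := by
  induction cs generalizing w u l p with
  | nil => simp
  | cons c cs ih =>
    by_cases hm : c ∈ pvMarks
    · simp [List.foldl_cons, hm, ih, pv_mark_not_upper hm, pv_mark_not_lower hm]
      ring
    · by_cases hu : PySem.Chars.isupper c = true
      · simp [List.foldl_cons, hm, hu, ih, pv_upper_not_lower hu]
        ring
      · by_cases hl : PySem.Chars.islower c = true
        · simp [List.foldl_cons, hm, hu, hl, ih]
          ring
        · simp [List.foldl_cons, hm, hu, hl, ih]

-- 0/1 indicator sum over a Nodup list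
theorem pv_sum_indicator (m : List Char) (hnd : m.Nodup) (c : Char) :
    (m.map (fun k => if k == c then (1 : Int) else 0)).sum = if c ∈ m then 1 else 0 := by
  induction m with
  | nil => simp
  | cons x xs ih =>
    simp only [List.nodup_cons] at hnd
    simp only [List.map_cons, List.sum_cons, ih hnd.2, List.mem_cons]
    by_cases hx : x = c
    · subst hx
      simp [hnd.1]
    · simp [hx, Ne.symm hx]

-- summing the multiplicities of the distinct characters of a category = countP
theorem pv_sum_count (q : Char → Bool) (l : List Char) (hnd : l.Nodup)
    (cs : List Char) (hcov : ∀ c ∈ cs, c ∈ l) :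
    ((l.filter q).map (fun k => (cs.count k : Int))).sum = (cs.countP q : Int) := by
  induction cs with
  | nil => simp
  | cons c cs ih =>
    have hcov' : ∀ x ∈ cs, x ∈ l := fun x hx => hcov x (List.mem_cons_of_mem _ hx)
    have hc : c ∈ l := hcov c (List.mem_cons_self ..)
    have hstep : ((l.filter q).map (fun k => ((c :: cs).count k : Int))).sum
        = ((l.filter q).map (fun k => (cs.count k : Int))).sum
          + ((l.filter q).map (fun k => if k == c then (1 : Int) else 0)).sum := by
      rw [← List.sum_map_add]
      refine congrArg List.sum (List.map_congr_left (fun k _ => ?_))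
      by_cases hkc : k = c
      · subst hkc; simp
      · simp [hkc, Ne.symm hkc]
    rw [hstep, ih hcov', pv_sum_indicator _ (hnd.filter q) c, List.countP_cons]
    by_cases hq : q c = true
    · have hmem : c ∈ l.filter q := List.mem_filter.mpr ⟨hc, hq⟩
      simp [hq, hmem]
    · have hmem : c ∉ l.filter q := fun h => hq (List.mem_filter.mp h).2
      simp [hq, hmem]

-- turning B's filtered item lists into filtered distinct-character lists
theorem pv_key (cs : List Char) (q : Char → Bool) :
    (((PySem.Set.ofList cs).map (fun k => (k, (cs.count k : Int)))).filter
        (fun kv => q kv.1)).map (·.2)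
      = ((PySem.Set.ofList cs).filter q).map (fun k => (cs.count k : Int)) := by
  simp [List.filter_map, List.map_map, Function.comp_def]

-- ===== VERDICT (by name: the statement is the Claim_ definition above) =====
theorem text_analyzer_spec : Claim_equal_text_analyzer := by
  intro text _
  show text_analyzer text = text_analyzer_alt text
  have hnd := PySem.Set.nodup_ofList (xs := text.toList)
  have hcov : ∀ c ∈ text.toList, c ∈ PySem.Set.ofList text.toList :=
    fun c h => (PySem.Set.mem_ofList _ _).mpr h
  show (text.toList.foldl (fun (st : Int × Int × Int × Int) c =>
      let (w, u, l, p) := st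
      if c ∈ pvMarks then (w, u, l, p + 1)
      else if PySem.Chars.isupper c then (w, u + 1, l, p)
      else if PySem.Chars.islower c then (w, u, l + 1, p)
      else st) (0, 0, 0, 0)) =
    (0,
     (((text.toList.foldl (fun d ch => d.insert ch (d.getD ch 0 + 1))
          PySem.Dict.empty).items.filter (fun kv => PySem.Chars.isupper kv.1)).map (·.2)).sum,
     (((text.toList.foldl (fun d ch => d.insert ch (d.getD ch 0 + 1))
          PySem.Dict.empty).items.filter (fun kv => PySem.Chars.islower kv.1)).map (·.2)).sum,
     (((text.toList.foldl (fun d ch => d.insert ch (d.getD ch 0 + 1))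
          PySem.Dict.empty).items.filter (fun kv => kv.1 ∈ pvMarks)).map (·.2)).sum)
  rw [pv_A_loop, PySem.Dict.foldl_insert_getD_add_one_eq_counter, PySem.Dict.items_counter,
    pv_key, pv_key, pv_key text.toList (fun x => decide (x ∈ pvMarks)),
    pv_sum_count PySem.Chars.isupper _ hnd _ hcov,
    pv_sum_count PySem.Chars.islower _ hnd _ hcov,
    pv_sum_count (fun x => decide (x ∈ pvMarks)) _ hnd _ hcov]
  simp
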